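-- pv_equiv track=rewrite | github.com/ankitects/anki | pylib/anki/models.py | _convert_legacy_map
-- ===== SOURCE A (Python) =====
-- def _convert_legacy_map(
--     old_to_new: dict[int, int | None], new_count: int
-- ) -> list[int]:
--     "Convert old->new map to list of old indexes"
--     new_to_old = {v: k for k, v in old_to_new.items() if v is not None}
--     out = []
--     for idx in range(new_count):
--         try:
--             val = new_to_old[idx]
--         except KeyError:
--             val = -1
--
--         out.append(val)
--     return out
-- ===== SOURCE B (Python) =====
-- def _convert_legacy_map(old_to_new, new_count):
--     "Convert old->new map to list of old indexes"
--     out = [-1] * new_count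
--     for old, new in old_to_new.items():
--         if new is not None and 0 <= new < new_count:
--             out[new] = old
--     return out
-- ===== Notes on version B (the rewrite author's own statement) =====
-- stated objective: simpler
-- what changed: B preallocates the output filled with -1 and scatters each old index into its new position in one pass over the items, instead of building a reverse dict and pulling per output index with try/except.
import Mathlib
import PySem

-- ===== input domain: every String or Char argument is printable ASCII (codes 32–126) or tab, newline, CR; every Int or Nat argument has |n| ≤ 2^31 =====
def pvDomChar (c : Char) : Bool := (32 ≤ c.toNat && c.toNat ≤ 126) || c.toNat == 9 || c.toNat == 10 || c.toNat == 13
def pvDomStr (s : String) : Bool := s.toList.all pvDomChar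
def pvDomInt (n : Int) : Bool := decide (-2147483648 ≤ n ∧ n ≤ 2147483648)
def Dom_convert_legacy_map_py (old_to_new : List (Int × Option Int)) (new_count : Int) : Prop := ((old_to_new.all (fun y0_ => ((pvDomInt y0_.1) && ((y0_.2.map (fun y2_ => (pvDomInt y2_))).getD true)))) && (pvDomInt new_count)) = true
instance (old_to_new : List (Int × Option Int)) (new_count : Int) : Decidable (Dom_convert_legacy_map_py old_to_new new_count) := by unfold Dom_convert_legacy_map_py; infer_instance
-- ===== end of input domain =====

-- B scatters each old index into a preallocated [-1]*new_count list in one pass, instead of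
-- building a reverse dict and pulling per output index with try/except (objective: simpler).


-- ===== PORT A =====
-- {v: k for k, v in old_to_new.items() if v is not None}
def pvRevStep (d : PySem.Dict Int Int) (p : Int × Option Int) : PySem.Dict Int Int :=
  match p.2 with
  | some v => d.insert v p.1
  | none => d

def convert_legacy_map_py (old_to_new : List (Int × Option Int)) (new_count : Int) : List Int :=
  let new_to_old : PySem.Dict Int Int := old_to_new.foldl pvRevStep PySem.Dict.empty
  -- for idx in range(new_count): try new_to_old[idx] except KeyError -1; out.append(val)
  (PySem.List.pyRange 0 new_count 1).foldl
    (fun out idx => out ++ [new_to_old.getD idx (-1)]) []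

-- ===== PORT B =====
-- for old, new in old_to_new.items(): if new is not None and 0 <= new < new_count: out[new] = old
def pvScatStep (new_count : Int) (out : List Int) (p : Int × Option Int) : List Int :=
  match p.2 with
  | some v => if 0 ≤ v ∧ v < new_count then out.set v.toNat p.1 else out
  | none => out

def convert_legacy_map_py_alt (old_to_new : List (Int × Option Int)) (new_count : Int) : List Int :=
  old_to_new.foldl (pvScatStep new_count) (List.replicate new_count.toNat (-1))

-- ===== PRECONDITION & SPEC =====
def Spec_convert_legacy_map_py (old_to_new : List (Int × Option Int)) (new_count : Int) (out : List Int) : Prop := out = convert_legacy_map_py_alt old_to_new new_count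
instance (old_to_new : List (Int × Option Int)) (new_count : Int) (out : List Int) : Decidable (Spec_convert_legacy_map_py old_to_new new_count out) := by unfold Spec_convert_legacy_map_py; infer_instance

-- ===== CLAIM (what is proved, stated in full; the proofs are below) =====
def Claim_equal_convert_legacy_map_py : Prop := ∀ (old_to_new : List (Int × Option Int)) (new_count : Int), Dom_convert_legacy_map_py old_to_new new_count → Spec_convert_legacy_map_py old_to_new new_count (convert_legacy_map_py old_to_new new_count)

-- ===== LEMMAS AND PROOFS =====

-- Invariant: if out mirrors d on every position 0 ≤ j < new_count.toNat,
-- the scatter fold mirrors the reverse-dict fold.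
theorem pv_inv (n : Int) (l : List (Int × Option Int)) :
    ∀ (out : List Int) (d : PySem.Dict Int Int),
      out.length = n.toNat →
      (∀ j : Nat, j < n.toNat → out[j]? = some (d.getD (j : Int) (-1))) →
      (l.foldl (pvScatStep n) out).length = n.toNat ∧
      ∀ j : Nat, j < n.toNat →
        (l.foldl (pvScatStep n) out)[j]? = some ((l.foldl pvRevStep d).getD (j : Int) (-1)) := by
  induction l with
  | nil => intro out d hlen hmir; exact ⟨hlen, hmir⟩
  | cons p t ih =>
    intro out d hlen hmir
    simp only [List.foldl_cons]
    apply ih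
    · cases hp : p.2 with
      | none => simpa [pvScatStep, hp] using hlen
      | some v =>
        simp only [pvScatStep, hp]
        split <;> simp [hlen]
    · intro j hj
      cases hp : p.2 with
      | none => simpa [pvScatStep, pvRevStep, hp] using hmir j hj
      | some v =>
        simp only [pvScatStep, pvRevStep, hp]
        rw [PySem.Dict.getD_insert]
        split
        · rename_i hrange
          by_cases hjv : (j : Int) = v
          · have hv : v.toNat = j := by omega
            simp [hjv, hv, hlen, hj]
          · rw [List.getElem?_set_ne (by omega)]
            simp [hjv, hmir j hj]
        · rename_i hrange
          have hjv : ¬ (j : Int) = v := by omega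
          simp [hjv, hmir j hj]

-- A's loop is a map over the range.
theorem pv_A_eq_map (old_to_new : List (Int × Option Int)) (new_count : Int) :
    convert_legacy_map_py old_to_new new_count =
      (PySem.List.pyRange 0 new_count 1).map
        (fun idx => (old_to_new.foldl pvRevStep PySem.Dict.empty).getD idx (-1)) := by
  unfold convert_legacy_map_py
  simpa using PySem.List.foldl_append_singleton_eq_map
    (f := fun idx => (old_to_new.foldl pvRevStep PySem.Dict.empty).getD idx (-1))
    (l := PySem.List.pyRange 0 new_count 1) (acc := [])

-- ===== VERDICT (by name: the statement is the Claim_ definition above) =====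
theorem convert_legacy_map_py_spec : Claim_equal_convert_legacy_map_py := by
  intro old_to_new new_count _
  unfold Spec_convert_legacy_map_py convert_legacy_map_py_alt
  obtain ⟨hlen, hmir⟩ := pv_inv new_count old_to_new (List.replicate new_count.toNat (-1))
    PySem.Dict.empty (by simp)
    (by intro j hj; simp [hj, PySem.Dict.getD_empty])
  rw [pv_A_eq_map]
  apply List.ext_getElem?
  intro j
  by_cases hj : j < new_count.toNat
  · have hlt : j < ((PySem.List.pyRange 0 new_count 1).map
        (fun idx => (old_to_new.foldl pvRevStep PySem.Dict.empty).getD idx (-1))).length := by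
      simp [PySem.List.length_pyRange_one]; omega
    rw [hmir j hj, List.getElem?_eq_getElem hlt, List.getElem_map]
    have := PySem.List.getElem_pyRange_one (a := 0) (b := new_count)
      (k := j) (h := by simpa [PySem.List.length_pyRange_one] using hlt)
    simp [this]
  · rw [List.getElem?_eq_none, List.getElem?_eq_none]
    · omega
    · simp [PySem.List.length_pyRange_one]; omega
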